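-- pv_equiv track=rewrite | github.com/rediacc/cli | cli.py | camel_to_title
-- ===== SOURCE A (Python) =====
-- def camel_to_title(name):
--     """Convert camelCase or PascalCase to Title Case"""
--     # Handle special cases
--     special_cases = {
--         'vaultVersion': 'Vault Version',
--         'vaultContent': 'Vault Content',
--         'memberCount': 'Members',
--         'machineCount': 'Machines',
--         'bridgeCount': 'Bridges',
--         'repoCount': 'Repos',
--         'storageCount': 'Storage',
--         'scheduleCount': 'Schedules',
--         'queueCount': 'Queue Items',
--         'teamName': 'Team',
--         'regionName': 'Region',
--         'bridgeName': 'Bridge',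
--         'machineName': 'Machine',
--         'repoName': 'Repository',
--         'storageName': 'Storage',
--         'scheduleName': 'Schedule',
--         'userEmail': 'Email',
--         'companyName': 'Company',
--         'hasAccess': 'Access',
--         'isMember': 'Member',
--         'activated': 'Active'
--     }
--
--     if name in special_cases:
--         return special_cases[name]
--
--     # Insert spaces before capital letters
--     result = name[0].upper()
--     for char in name[1:]:
--         if char.isupper():
--             result += ' ' + char
--         else:
--             result += char
--
--     return result
-- ===== SOURCE B (Python) =====
-- def camel_to_title(name):
--     """Convert camelCase or PascalCase to Title Case"""
--     special_cases = {
--         'vaultVersion': 'Vault Version',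
--         'vaultContent': 'Vault Content',
--         'memberCount': 'Members',
--         'machineCount': 'Machines',
--         'bridgeCount': 'Bridges',
--         'repoCount': 'Repos',
--         'storageCount': 'Storage',
--         'scheduleCount': 'Schedules',
--         'queueCount': 'Queue Items',
--         'teamName': 'Team',
--         'regionName': 'Region',
--         'bridgeName': 'Bridge',
--         'machineName': 'Machine',
--         'repoName': 'Repository',
--         'storageName': 'Storage',
--         'scheduleName': 'Schedule',
--         'userEmail': 'Email',
--         'companyName': 'Company',
--         'hasAccess': 'Access',
--         'isMember': 'Member',
--         'activated': 'Active'
--     }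
--
--     if name in special_cases:
--         return special_cases[name]
--
--     # Split the tail into words at uppercase letters, word by word, then join.
--     words = []
--     c = name[0].upper()
--     rest = name[1:]
--     while True:
--         i = 0
--         while i < len(rest) and not rest[i].isupper():
--             i += 1
--         words.append(c + rest[:i])
--         if i == len(rest):
--             break
--         c, rest = rest[i], rest[i + 1:]
--     return ' '.join(words)
-- ===== Notes on version B (the rewrite author's own statement) =====
-- stated objective: alternative
-- what changed: A accumulates the output character by character, inserting a space before each uppercase; B instead peels the tail apart word by word (current char plus the following non-uppercase run, via slicing) and joins the collected words with single spaces.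
import Mathlib
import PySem

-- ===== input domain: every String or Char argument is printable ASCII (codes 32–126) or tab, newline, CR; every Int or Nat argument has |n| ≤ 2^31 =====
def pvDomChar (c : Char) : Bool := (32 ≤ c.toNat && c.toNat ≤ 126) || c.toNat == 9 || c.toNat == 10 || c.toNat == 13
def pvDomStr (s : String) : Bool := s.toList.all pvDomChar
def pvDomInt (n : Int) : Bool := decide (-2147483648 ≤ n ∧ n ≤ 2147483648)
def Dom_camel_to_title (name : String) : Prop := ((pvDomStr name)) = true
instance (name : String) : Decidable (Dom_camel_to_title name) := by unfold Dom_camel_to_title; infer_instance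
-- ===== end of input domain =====

-- B replaces A's character-accumulating loop by a word-splitting loop (slice off one word per step, then join); alternative decomposition, same cost.


-- shared constant table (data only, used by both ports)
def pvSpecialCases : PySem.Dict String String := PySem.Dict.ofList [
  ("vaultVersion", "Vault Version"), ("vaultContent", "Vault Content"),
  ("memberCount", "Members"), ("machineCount", "Machines"), ("bridgeCount", "Bridges"),
  ("repoCount", "Repos"), ("storageCount", "Storage"), ("scheduleCount", "Schedules"),
  ("queueCount", "Queue Items"), ("teamName", "Team"), ("regionName", "Region"),
  ("bridgeName", "Bridge"), ("machineName", "Machine"), ("repoName", "Repository"),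
  ("storageName", "Storage"), ("scheduleName", "Schedule"), ("userEmail", "Email"),
  ("companyName", "Company"), ("hasAccess", "Access"), ("isMember", "Member"),
  ("activated", "Active")]

-- ===== PORT A =====
def camel_to_title (name : String) : String :=
  match pvSpecialCases.get? name with
  | some v => v
  | none =>
    match name.toList with
    | [] => ""   -- Python raises IndexError on name[0] here; excluded by Pre_
    | c :: rest =>
      String.mk (rest.foldl
        (fun acc ch => if PySem.Chars.isupper ch then acc ++ [' ', ch] else acc ++ [ch])
        [PySem.Chars.upperChar c])

-- ===== PORT B =====
-- the while-True loop of Source B: peel one word (current char + following non-uppercase run) per step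
def pvSplitWords (acc : List (List Char)) (c : Char) (rest : List Char) : List (List Char) :=
  let body := rest.takeWhile (fun ch => !PySem.Chars.isupper ch)
  match h : rest.dropWhile (fun ch => !PySem.Chars.isupper ch) with
  | [] => acc ++ [c :: body]
  | d :: rs => pvSplitWords (acc ++ [c :: body]) d rs
termination_by rest.length
decreasing_by
  have := List.length_dropWhile_le (p := fun ch => !PySem.Chars.isupper ch) (l := rest)
  rw [h] at this; simp at this; omega

def camel_to_title_alt (name : String) : String :=
  match pvSpecialCases.get? name with
  | some v => v
  | none =>
    match name.toList with
    | [] => ""   -- Source B raises IndexError on name[0] here; excluded by Pre_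
    | c :: rest =>
      String.mk (PySem.Chars.join [' '] (pvSplitWords [] (PySem.Chars.upperChar c) rest))

-- ===== PRECONDITION & SPEC =====
-- Pre_ excludes only the empty string, on which both A and B raise IndexError (name[0]).
def Pre_camel_to_title (name : String) : Prop := name ≠ ""
instance (name : String) : Decidable (Pre_camel_to_title name) := by unfold Pre_camel_to_title; infer_instance
def pvWitness_camel_to_title : String := "fooBar"

def Spec_camel_to_title (name : String) (out : String) : Prop := out = camel_to_title_alt name
instance (name : String) (out : String) : Decidable (Spec_camel_to_title name out) := by unfold Spec_camel_to_title; infer_instance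

-- ===== CLAIM (what is proved, stated in full; the proofs are below) =====
def Claim_equal_camel_to_title : Prop := ∀ (name : String), Dom_camel_to_title name → Pre_camel_to_title name → Spec_camel_to_title name (camel_to_title name)

-- ===== LEMMAS AND PROOFS =====

-- the expansion a single character contributes in A's loop
def pvG (ch : Char) : List Char := if PySem.Chars.isupper ch then [' ', ch] else [ch]

-- proof-side accumulator-free version of pvSplitWords
def pvWordsPure (c : Char) (rest : List Char) : List (List Char) :=
  let body := rest.takeWhile (fun ch => !PySem.Chars.isupper ch)
  match h : rest.dropWhile (fun ch => !PySem.Chars.isupper ch) with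
  | [] => [c :: body]
  | d :: rs => (c :: body) :: pvWordsPure d rs
termination_by rest.length
decreasing_by
  have := List.length_dropWhile_le (p := fun ch => !PySem.Chars.isupper ch) (l := rest)
  rw [h] at this; simp at this; omega

lemma pvWordsPure_ne_nil (c : Char) (rest : List Char) : pvWordsPure c rest ≠ [] := by
  rw [pvWordsPure.eq_def]; split <;> simp

lemma pvSplitWords_eq (n : Nat) : ∀ (rest : List Char) (c : Char) (acc : List (List Char)),
    rest.length ≤ n → pvSplitWords acc c rest = acc ++ pvWordsPure c rest := by
  induction n with
  | zero =>
    intro rest c acc hn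
    have hz : rest = [] := List.eq_nil_of_length_eq_zero (Nat.le_zero.mp hn)
    subst hz
    rw [pvSplitWords.eq_def, pvWordsPure.eq_def]
    rfl
  | succ n ih =>
    intro rest c acc hn
    rw [pvSplitWords.eq_def, pvWordsPure.eq_def]
    split
    · rfl
    · rename_i d rs heq1
      have hlen : rs.length ≤ n := by
        have := List.length_dropWhile_le (p := fun ch => !PySem.Chars.isupper ch) (l := rest)
        rw [heq1] at this; simp at this; omega
      rw [ih rs d _ hlen]
      simp

lemma pvJoin_words (n : Nat) : ∀ (rest : List Char) (c : Char), rest.length ≤ n →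
    PySem.Chars.join [' '] (pvWordsPure c rest) = c :: rest.flatMap pvG := by
  induction n with
  | zero =>
    intro rest c hn
    have hz : rest = [] := List.eq_nil_of_length_eq_zero (Nat.le_zero.mp hn)
    subst hz
    rw [pvWordsPure.eq_def]
    simp [PySem.Chars.join_singleton]
  | succ n ih =>
    intro rest c hn
    have hsplit := List.takeWhile_append_dropWhile (p := fun ch => !PySem.Chars.isupper ch) (l := rest)
    have hbody : (rest.takeWhile (fun ch => !PySem.Chars.isupper ch)).flatMap pvG
        = rest.takeWhile (fun ch => !PySem.Chars.isupper ch) := by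
      have hmem : ∀ ch ∈ rest.takeWhile (fun ch => !PySem.Chars.isupper ch), pvG ch = [ch] := by
        intro ch hch
        have := List.mem_takeWhile_imp hch
        simp at this
        simp [pvG, this]
      calc (rest.takeWhile (fun ch => !PySem.Chars.isupper ch)).flatMap pvG
          = (rest.takeWhile (fun ch => !PySem.Chars.isupper ch)).flatMap (fun ch => [ch]) :=
            List.flatMap_congr hmem
        _ = _ := List.flatMap_singleton' _
    rw [pvWordsPure.eq_def]
    split
    · rename_i heq
      have h1 : rest.flatMap pvG = rest := by
        conv_lhs => rw [← hsplit, heq]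
        conv_rhs => rw [← hsplit, heq]
        simpa using hbody
      rw [h1, PySem.Chars.join_singleton]
      conv_rhs => rw [← hsplit, heq]
      simp
    · rename_i d rs heq
      have hd : PySem.Chars.isupper d = true := by
        have := List.head_dropWhile_not (p := fun ch => !PySem.Chars.isupper ch) (l := rest)
          (by simp [heq])
        simp [heq] at this; exact this
      have hlen : rs.length ≤ n := by
        have := List.length_dropWhile_le (p := fun ch => !PySem.Chars.isupper ch) (l := rest)
        rw [heq] at this; simp at this; omega
      rcases hws : pvWordsPure d rs with _ | ⟨w, ws⟩
      · exact absurd hws (pvWordsPure_ne_nil d rs)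
      · rw [PySem.Chars.join_cons_cons, ← hws, ih rs d hlen]
        conv_rhs => rw [← hsplit, heq]
        simp [hbody, pvG, hd]

lemma pvFold_eq_flatMap (rest : List Char) (init : List Char) :
    rest.foldl
        (fun acc ch => if PySem.Chars.isupper ch then acc ++ [' ', ch] else acc ++ [ch])
        init = init ++ rest.flatMap pvG := by
  have hfun : (fun (acc : List Char) ch =>
      if PySem.Chars.isupper ch then acc ++ [' ', ch] else acc ++ [ch])
      = fun acc ch => acc ++ pvG ch := by
    funext acc ch; simp only [pvG]; split <;> rfl
  rw [hfun, PySem.List.foldl_append_eq_flatMap]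

-- ===== VERDICT (by name: the statement is the Claim_ definition above) =====
theorem camel_to_title_spec : Claim_equal_camel_to_title := by
  intro name _ hpre
  unfold Spec_camel_to_title camel_to_title camel_to_title_alt
  cases pvSpecialCases.get? name with
  | some v => rfl
  | none =>
    cases hl : name.toList with
    | nil => rfl
    | cons c rest =>
      simp only []
      rw [pvFold_eq_flatMap, pvSplitWords_eq rest.length rest _ [] (le_refl _),
        List.nil_append, pvJoin_words rest.length rest _ (le_refl _)]
      simp
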